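-- pv_equiv track=rewrite | github.com/berkemBillur/ConvFinQA | src/predictors/multi_agent/orchestrator.py | _estimate_remaining_tokens
-- ===== SOURCE A (Python) =====
-- def _estimate_remaining_tokens(current_stage: str) -> int:
--     """Estimate tokens needed for remaining pipeline stages."""
--     stage_estimates = {
--         "manager": 500,
--         "extraction": 1500,
--         "reasoning": 2000,
--         "critics": 1000,
--         "synthesis": 800
--     }
--
--     stage_order = ["manager", "extraction", "reasoning", "critics", "synthesis"]
--
--     try:
--         current_index = stage_order.index(current_stage)
--         remaining_stages = stage_order[current_index + 1:]
--         return sum(stage_estimates.get(stage, 500) for stage in remaining_stages)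
--     except ValueError:
--         return 2000  # Default conservative estimate
-- ===== SOURCE B (Python) =====
-- def _estimate_remaining_tokens(current_stage: str) -> int:
--     """Estimate tokens needed for remaining pipeline stages."""
--     pipeline = [
--         ("manager", 500),
--         ("extraction", 1500),
--         ("reasoning", 2000),
--         ("critics", 1000),
--         ("synthesis", 800),
--     ]
--
--     def after(stages):
--         # walk the pipeline until we hit the current stage,
--         # then the answer is the sum of the remaining costs
--         if not stages:
--             return 2000  # unknown stage: conservative default
--         (name, _cost), rest = stages[0], stages[1:]
--         if name == current_stage:
--             return sum(c for _, c in rest)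
--         return after(rest)
--
--     return after(pipeline)
-- ===== Notes on version B (the rewrite author's own statement) =====
-- stated objective: alternative
-- what changed: B replaces A's dict + list.index + slice + per-stage dict lookups with a single recursive scan over one list of (stage, cost) pairs that sums the tail once the stage is found.
import Mathlib
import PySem

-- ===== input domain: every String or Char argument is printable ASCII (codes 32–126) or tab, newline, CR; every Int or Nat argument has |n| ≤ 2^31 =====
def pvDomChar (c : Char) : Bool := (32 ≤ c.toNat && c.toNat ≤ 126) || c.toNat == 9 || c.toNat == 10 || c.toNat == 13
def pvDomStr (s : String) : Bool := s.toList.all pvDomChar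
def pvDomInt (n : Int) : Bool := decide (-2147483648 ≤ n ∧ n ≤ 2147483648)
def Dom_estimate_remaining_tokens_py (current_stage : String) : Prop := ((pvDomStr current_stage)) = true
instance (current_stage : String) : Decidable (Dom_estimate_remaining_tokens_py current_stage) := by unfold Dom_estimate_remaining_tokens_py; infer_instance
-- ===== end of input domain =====

-- B replaces A's dict + index + slice + summation with one recursive scan over
-- a single list of (stage, cost) pairs (objective: alternative decomposition).

-- ===== PORT A =====
-- A: find current_stage's index, slice off the tail, sum the estimates (default 500).
def estimate_remaining_tokens_py (current_stage : String) : Int :=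
  let stage_estimates : PySem.Dict String Int :=
    PySem.Dict.ofList [("manager", 500), ("extraction", 1500), ("reasoning", 2000),
                       ("critics", 1000), ("synthesis", 800)]
  let stage_order : List String :=
    ["manager", "extraction", "reasoning", "critics", "synthesis"]
  match PySem.List.index? stage_order current_stage with
  | some current_index =>
      let remaining_stages :=
        PySem.List.slice stage_order (some ((current_index : Int) + 1)) none
      remaining_stages.foldl (fun acc stage => acc + stage_estimates.getD stage 500) 0
  | none => 2000  -- ValueError branch

-- ===== PORT B =====
-- B's inner 'after': walk the (stage, cost) list; on a name match sum the rest's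
-- costs, on exhaustion return the default 2000.
def pvAfter (current_stage : String) : List (String × Int) → Int
  | [] => 2000
  | (name, _cost) :: rest =>
      if name == current_stage then rest.foldl (fun acc p => acc + p.2) 0
      else pvAfter current_stage rest

def estimate_remaining_tokens_py_alt (current_stage : String) : Int :=
  pvAfter current_stage
    [("manager", 500), ("extraction", 1500), ("reasoning", 2000),
     ("critics", 1000), ("synthesis", 800)]

-- ===== PRECONDITION & SPEC =====
def Spec_estimate_remaining_tokens_py (current_stage : String) (out : Int) : Prop := out = estimate_remaining_tokens_py_alt current_stage
instance (current_stage : String) (out : Int) : Decidable (Spec_estimate_remaining_tokens_py current_stage out) := by unfold Spec_estimate_remaining_tokens_py; infer_instance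

-- ===== CLAIM (what is proved, stated in full; the proofs are below) =====
def Claim_equal_estimate_remaining_tokens_py : Prop := ∀ (current_stage : String), Dom_estimate_remaining_tokens_py current_stage → Spec_estimate_remaining_tokens_py current_stage (estimate_remaining_tokens_py current_stage)

-- ===== LEMMAS AND PROOFS =====

-- Both programs return 2000 on any stage outside the five known names.
theorem pv_default_case (s : String)
    (h1 : s ≠ "manager") (h2 : s ≠ "extraction") (h3 : s ≠ "reasoning")
    (h4 : s ≠ "critics") (h5 : s ≠ "synthesis") :
    estimate_remaining_tokens_py s = 2000 ∧
    estimate_remaining_tokens_py_alt s = 2000 := by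
  have b1 : ("manager" == s) = false := by simp [Ne.symm h1]
  have b2 : ("extraction" == s) = false := by simp [Ne.symm h2]
  have b3 : ("reasoning" == s) = false := by simp [Ne.symm h3]
  have b4 : ("critics" == s) = false := by simp [Ne.symm h4]
  have b5 : ("synthesis" == s) = false := by simp [Ne.symm h5]
  constructor
  · have hnone : PySem.List.index?
        ["manager", "extraction", "reasoning", "critics", "synthesis"] s = none := by
      rw [PySem.List.index?_eq_none_iff]
      simp only [List.mem_cons, List.not_mem_nil, or_false, not_or]
      exact ⟨h1, h2, h3, h4, h5⟩
    show (match PySem.List.index? ["manager", "extraction", "reasoning", "critics", "synthesis"] s with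
      | some current_index =>
          (PySem.List.slice ["manager", "extraction", "reasoning", "critics", "synthesis"]
              (some ((current_index : Int) + 1)) none).foldl
            (fun acc stage =>
              acc + (PySem.Dict.ofList [("manager", (500:Int)), ("extraction", 1500),
                ("reasoning", 2000), ("critics", 1000), ("synthesis", 800)]).getD stage 500) 0
      | none => 2000) = 2000
    rw [hnone]
  · simp [estimate_remaining_tokens_py_alt, pvAfter, b1, b2, b3, b4, b5]

-- ===== VERDICT (by name: the statement is the Claim_ definition above) =====
theorem estimate_remaining_tokens_py_spec : Claim_equal_estimate_remaining_tokens_py := by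
  intro s _
  unfold Spec_estimate_remaining_tokens_py
  by_cases h1 : s = "manager"; · subst h1; decide
  by_cases h2 : s = "extraction"; · subst h2; decide
  by_cases h3 : s = "reasoning"; · subst h3; decide
  by_cases h4 : s = "critics"; · subst h4; decide
  by_cases h5 : s = "synthesis"; · subst h5; decide
  obtain ⟨ha, hb⟩ := pv_default_case s h1 h2 h3 h4 h5
  rw [ha, hb]
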